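-- pv_equiv track=rewrite | github.com/greeneb/wiedemann | core/wiedemann.py | apply_poly_to_sequence
-- ===== SOURCE A (Python) =====
-- def apply_poly_to_sequence(poly, sequence):
--     """
--     Multiply a polynomial (represented by coefficient list) with a sequence.
--     Polynomial is applied as: conv(poly, sequence), truncated appropriately.
--
--     Args:
--         poly: list of GF(2) coefficients, lowest degree first (e.g. [1, 0, 1] = 1 + z^2)
--         sequence: list of elements over GF(2)
--
--     Returns:
--         List of GF(2) values: the result of polynomial applied to the sequence
--     """
--     result_len = len(sequence) - len(poly) + 1
--     result = []
--     for i in range(result_len):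
--         acc = 0
--         for j, coeff in enumerate(poly):
--             if i + j < len(sequence):
--                 acc ^= coeff * sequence[i + j]
--         result.append(acc % 2) # TODO: maybe mod 2?
--     return result
-- ===== SOURCE B (Python) =====
-- def apply_poly_to_sequence(poly, sequence):
--     # Pack sequence parities one-per-byte; each odd poly coefficient XORs the
--     # rl-byte window starting at its offset (XOR of 0/1 bytes never carries),
--     # so byte i of the accumulator is the GF(2) correlation at output index i.
--     n = len(sequence)
--     rl = max(n - len(poly) + 1, 0)
--     P = bytes(s & 1 for s in sequence)
--     T = 0
--     for j, c in enumerate(poly):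
--         if c & 1:
--             T ^= int.from_bytes(P[j:j+rl], 'little')
--     return list(T.to_bytes(max(rl, 1), 'little')[:rl])
-- ===== Notes on version B (the rewrite author's own statement) =====
-- stated objective: alternative
-- what changed: Instead of A's nested per-element loops, B packs the sequence parities one-per-byte with bytes()/int.from_bytes, XORs one result-window of bytes as a single big integer per odd polynomial coefficient (carry-free word-parallel GF(2) arithmetic), and reads the result bytes off with to_bytes.
import Mathlib
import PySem

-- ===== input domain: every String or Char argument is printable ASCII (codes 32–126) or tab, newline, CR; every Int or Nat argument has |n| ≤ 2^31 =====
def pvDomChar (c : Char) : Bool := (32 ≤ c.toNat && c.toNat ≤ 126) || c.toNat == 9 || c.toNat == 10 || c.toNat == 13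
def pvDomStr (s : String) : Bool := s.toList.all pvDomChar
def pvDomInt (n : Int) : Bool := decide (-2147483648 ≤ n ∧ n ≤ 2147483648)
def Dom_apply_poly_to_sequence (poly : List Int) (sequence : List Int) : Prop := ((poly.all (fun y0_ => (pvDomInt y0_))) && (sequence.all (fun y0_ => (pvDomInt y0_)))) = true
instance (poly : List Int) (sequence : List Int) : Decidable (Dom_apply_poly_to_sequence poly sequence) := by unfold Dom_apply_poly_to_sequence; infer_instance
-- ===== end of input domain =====

-- B replaces A's nested per-element loops by packing the sequence parities one-per-byte
-- and XOR-ing, per odd poly coefficient, the result-window of bytes as ONE big integer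
-- (carry-free word-parallel GF(2) arithmetic; a different algorithm, similar measured cost).

-- ===== PORT A =====
def apply_poly_to_sequence (poly : List Int) (sequence : List Int) : List Int :=
  let result_len : Int := (sequence.length : Int) - (poly.length : Int) + 1
  (PySem.List.pyRange 0 result_len 1).foldl
    (fun result i =>
      let acc : Int := (PySem.List.enumerate poly 0).foldl
        (fun acc jc =>
          if i + jc.1 < (sequence.length : Int) then
            PySem.Int.bxor acc (jc.2 * PySem.List.pyGetD sequence (i + jc.1) 0)
          else acc) 0
      result ++ [PySem.Int.mod acc 2]) []

-- ===== PORT B =====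
-- int.from_bytes(bs, 'little') is ported as pvFromBytes (the obvious byte fold);
-- the byte-window slice P[j:j+rl] is drop/take (Python slices clamp the same way);
-- T.to_bytes(max(rl, 1), 'little')[:rl] is ported as reading bytes (T >> 8i) & 255
-- for i < rl (exact: T < 256^max(rl, 1), so no overflow, and bytes are read little-endian).
def pvFromBytes (l : List Nat) : Nat := l.foldr (fun b acc => b ||| (acc <<< 8)) 0

def apply_poly_to_sequence_alt (poly : List Int) (sequence : List Int) : List Int :=
  let rl : Nat := (max ((sequence.length : Int) - (poly.length : Int) + 1) 0).toNat
  let P : List Nat := sequence.map (fun s => (PySem.Int.band s 1).toNat)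
  let T : Nat := (PySem.List.enumerate poly 0).foldl
    (fun T p => if PySem.Int.band p.2 1 ≠ 0 then
        T ^^^ pvFromBytes ((P.drop p.1.toNat).take rl)
      else T) 0
  (List.range rl).map (fun i => (((T >>> (8 * i)) &&& 255 : Nat) : Int))

-- ===== PRECONDITION & SPEC =====
def Spec_apply_poly_to_sequence (poly : List Int) (sequence : List Int) (out : List Int) : Prop := out = apply_poly_to_sequence_alt poly sequence
instance (poly : List Int) (sequence : List Int) (out : List Int) : Decidable (Spec_apply_poly_to_sequence poly sequence out) := by unfold Spec_apply_poly_to_sequence; infer_instance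

-- ===== CLAIM (what is proved, stated in full; the proofs are below) =====
def Claim_equal_apply_poly_to_sequence : Prop := ∀ (poly : List Int) (sequence : List Int), Dom_apply_poly_to_sequence poly sequence → Spec_apply_poly_to_sequence poly sequence (apply_poly_to_sequence poly sequence)

-- ===== LEMMAS AND PROOFS =====

-- parity bit of sequence element k (false past the end)
def pvSb (seq : List Int) (k : Nat) : Bool :=
  match seq[k]? with
  | some v => decide (PySem.Int.mod v 2 = 1)
  | none => false

-- common specification: bit i of the accumulator restricted to the poly suffix whose
-- first coefficient has window offset j, with windows of rl bytes
def pvG (seq : List Int) (rl : Nat) : List Int → Nat → Nat → Bool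
  | [], _, _ => false
  | c :: t, j, i =>
      xor (decide (PySem.Int.mod c 2 = 1) &&
           (decide (i % 8 = 0) && decide (i / 8 < rl) && pvSb seq (j + i / 8)))
          (pvG seq rl t (j + 1) i)

theorem pv_testBit_one (m : Nat) : Nat.testBit 1 m = decide (m = 0) := by
  rcases m with _ | m <;> simp [Nat.testBit_succ]

theorem pv_natxor_two (m n : Nat) : (m ^^^ n) % 2 = (m % 2 + n % 2) % 2 := by
  have h := Nat.testBit_xor m n 0
  simp only [Nat.testBit_zero] at h
  rcases Nat.mod_two_eq_zero_or_one m with hm | hm <;>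
  rcases Nat.mod_two_eq_zero_or_one n with hn | hn <;>
  simp [hm, hn] at h ⊢ <;> omega

-- parity of a Python xor of ints (any signs)
theorem pv_bxor_mod_two (a b : Int) :
    PySem.Int.mod (PySem.Int.bxor a b) 2 = (PySem.Int.mod a 2 + PySem.Int.mod b 2) % 2 := by
  unfold PySem.Int.bxor
  rw [PySem.Int.mod_eq_emod_of_pos (by norm_num), PySem.Int.mod_eq_emod_of_pos (by norm_num),
      PySem.Int.mod_eq_emod_of_pos (by norm_num)]
  split_ifs with ha hb hb
  · have h := pv_natxor_two a.toNat b.toNat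
    have : (a.toNat : Int) = a := Int.toNat_of_nonneg ha
    have : (b.toNat : Int) = b := Int.toNat_of_nonneg hb
    omega
  · have h := pv_natxor_two a.toNat (-b-1).toNat
    have : (a.toNat : Int) = a := Int.toNat_of_nonneg ha
    have : ((-b-1).toNat : Int) = -b-1 := Int.toNat_of_nonneg (by omega)
    omega
  · have h := pv_natxor_two (-a-1).toNat b.toNat
    have : ((-a-1).toNat : Int) = -a-1 := Int.toNat_of_nonneg (by omega)
    have : (b.toNat : Int) = b := Int.toNat_of_nonneg hb
    omega
  · have h := pv_natxor_two (-a-1).toNat (-b-1).toNat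
    have : ((-a-1).toNat : Int) = -a-1 := Int.toNat_of_nonneg (by omega)
    have : ((-b-1).toNat : Int) = -b-1 := Int.toNat_of_nonneg (by omega)
    omega

-- bit k of a little-endian byte pack whose bytes are all 0 or 1
theorem pv_fromBytes_testBit (l : List Nat) (hl : ∀ x ∈ l, x ≤ 1) (k : Nat) :
    (pvFromBytes l).testBit k
      = (decide (k % 8 = 0) && (match l[k / 8]? with
          | some v => decide (v = 1)
          | none => false)) := by
  induction l generalizing k with
  | nil => simp [pvFromBytes]
  | cons b t ih =>
    have hb : b ≤ 1 := hl b (List.mem_cons_self)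
    have ht : ∀ x ∈ t, x ≤ 1 := fun x hx => hl x (List.mem_cons_of_mem _ hx)
    show ((b ||| (pvFromBytes t <<< 8))).testBit k = _
    rw [Nat.testBit_or, Nat.testBit_shiftLeft]
    rcases Nat.lt_or_ge k 8 with hk | hk
    · have h1 : ¬ (k ≥ 8) := by omega
      rcases Nat.eq_zero_or_pos k with hk0 | hk0
      · subst hk0
        interval_cases b <;> simp [pv_testBit_one, Nat.zero_testBit]
      · have h2 : ¬ (k % 8 = 0) := by omega
        have h3 : k / 8 = 0 := by omega
        interval_cases b <;>
          simp [pv_testBit_one, Nat.zero_testBit, h1, h2, h3] <;> omega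
    · have h8 : (k - 8) % 8 = k % 8 := by omega
      have hd : k / 8 = (k - 8) / 8 + 1 := by omega
      have hbk : b.testBit k = false := by
        interval_cases b <;> simp [pv_testBit_one, Nat.zero_testBit] <;> omega
      rw [ih ht (k - 8)]
      simp [hbk, hk, h8, hd]

-- bit i of the XOR-window for the poly coefficient at offset j
theorem pv_W_testBit (seq : List Int) (rl : Nat) (j i : Nat) :
    (pvFromBytes (((seq.map (fun s => (PySem.Int.band s 1).toNat)).drop j).take rl)).testBit i
      = (decide (i % 8 = 0) && decide (i / 8 < rl) && pvSb seq (j + i / 8)) := by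
  have hl : ∀ x ∈ ((seq.map (fun s => (PySem.Int.band s 1).toNat)).drop j).take rl, x ≤ 1 := by
    intro x hx
    have hx' := List.mem_of_mem_drop (List.mem_of_mem_take hx)
    obtain ⟨s, _, rfl⟩ := List.mem_map.mp hx'
    rw [PySem.Int.band_one]
    rcases PySem.Int.mod_two_eq s with h | h <;> rw [h] <;> norm_num
  rw [pv_fromBytes_testBit _ hl]
  by_cases h8 : i % 8 = 0
  · simp only [h8, decide_true, Bool.true_and]
    by_cases hrl : i / 8 < rl
    · rw [List.getElem?_take_of_lt hrl, List.getElem?_drop, List.getElem?_map]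
      simp only [hrl, decide_true, Bool.true_and, pvSb]
      rcases hsq : seq[j + i / 8]? with _ | v
      · simp
      · simp only [Option.map_some]
        rw [PySem.Int.band_one]
        rcases PySem.Int.mod_two_eq v with h | h <;> rw [h] <;> norm_num
    · rw [List.getElem?_take_eq_none (by omega)]
      simp [hrl]
  · simp [h8]

-- bit i of B's accumulator fold
theorem pv_T_testBit (seq : List Int) (rl : Nat)
    (poly : List Int) (j a : Nat) (i : Nat) :
    (((PySem.List.enumerate poly (j : Int)).foldl
        (fun T p => if PySem.Int.band p.2 1 ≠ 0 then
            T ^^^ pvFromBytes (((seq.map (fun s => (PySem.Int.band s 1).toNat)).drop p.1.toNat).take rl)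
          else T) a)).testBit i
      = xor (a.testBit i) (pvG seq rl poly j i) := by
  induction poly generalizing j a with
  | nil => simp [PySem.List.enumerate, pvG]
  | cons c t ih =>
    have hcast : ((j : Int) + 1) = ((j + 1 : Nat) : Int) := by push_cast; ring
    simp only [PySem.List.enumerate, List.foldl_cons, hcast]
    rw [ih]
    have hb : PySem.Int.band c 1 = c % 2 := by
      rw [PySem.Int.band_one, PySem.Int.mod_eq_emod_of_pos (by norm_num)]
    have hm : PySem.Int.mod c 2 = c % 2 := PySem.Int.mod_eq_emod_of_pos (by norm_num)
    rcases Int.emod_two_eq_zero_or_one c with h | h <;>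
      simp [pvG, hb, hm, h, Nat.testBit_xor, pv_W_testBit, Int.toNat_natCast]

-- bits off the byte grid are never set in the accumulator
theorem pv_G_offgrid (seq : List Int) (rl : Nat) (poly : List Int) (j i : Nat)
    (h : ¬ i % 8 = 0) : pvG seq rl poly j i = false := by
  induction poly generalizing j with
  | nil => simp [pvG]
  | cons c t ih => simp [pvG, h, ih]

-- A's inner xor-accumulator loop, taken mod 2
theorem pv_A_mod (seq : List Int) (rl : Nat) (poly : List Int) (k : Nat) (hk : k < rl)
    (j : Nat) (acc : Int) :
    PySem.Int.mod ((PySem.List.enumerate poly (j : Int)).foldl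
      (fun acc jc => if (k : Int) + jc.1 < (seq.length : Int) then
          PySem.Int.bxor acc (jc.2 * PySem.List.pyGetD seq ((k : Int) + jc.1) 0)
        else acc) acc) 2
      = (PySem.Int.mod acc 2 + (if pvG seq rl poly j (8 * k) then 1 else 0)) % 2 := by
  induction poly generalizing j acc with
  | nil =>
    simp only [PySem.List.enumerate, List.foldl_nil, pvG]
    rcases PySem.Int.mod_two_eq acc with h | h <;> rw [h] <;> norm_num
  | cons c t ih =>
    have hcast : ((j : Int) + 1) = ((j + 1 : Nat) : Int) := by push_cast; ring
    simp only [PySem.List.enumerate, List.foldl_cons, hcast]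
    rw [ih]
    have hm : ∀ x : Int, PySem.Int.mod x 2 = x % 2 := fun x => PySem.Int.mod_eq_emod_of_pos (by norm_num)
    have hdiv : 8 * k / 8 = k := by omega
    have hmod : 8 * k % 8 = 0 := by omega
    by_cases hg : (k : Int) + (j : Int) < (seq.length : Int)
    · have hlt : j + k < seq.length := by omega
      have hget : PySem.List.pyGetD seq ((k : Int) + (j : Int)) 0 = seq[j + k] := by
        rw [show ((k : Int) + (j : Int)) = ((j + k : Nat) : Int) by push_cast; ring,
            PySem.List.pyGetD_natCast, List.getD_eq_getElem _ _ hlt]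
      have hsb : pvSb seq (j + k) = decide (seq[j + k] % 2 = 1) := by
        simp [pvSb, List.getElem?_eq_getElem hlt]
      have hprod : (c * seq[j + k]) % 2 = (c % 2) * (seq[j + k] % 2) % 2 := Int.mul_emod _ _ _
      have hx : ∀ a b : Int, PySem.Int.bxor a b % 2 = (a % 2 + b % 2) % 2 := fun a b => by
        have h := pv_bxor_mod_two a b; simpa [hm] using h
      simp only [hg, if_pos, hget, pvG, hdiv, hmod, hk, decide_true, Bool.true_and,
        hsb, hm, hx]
      rcases Int.emod_two_eq_zero_or_one c with h1 | h1 <;>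
        rcases Int.emod_two_eq_zero_or_one (seq[j + k]) with h2 | h2 <;>
        rcases Int.emod_two_eq_zero_or_one acc with h3 | h3 <;>
        rcases Bool.eq_false_or_eq_true (pvG seq rl t (j + 1) (8 * k)) with h4 | h4 <;>
        rw [hprod, h1, h2] <;> simp [h3, h4]
    · have hsb : pvSb seq (j + k) = false := by
        rw [pvSb, List.getElem?_eq_none_iff.mpr (show seq.length ≤ j + k by omega)]
      simp only [hg, if_neg, pvG, hdiv, hmod, hsb, hm, Bool.and_false, Bool.false_xor,
        not_false_iff]

-- extracting byte k of an accumulator whose off-grid bits vanish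
theorem pv_byte_extract (T : Nat) (k : Nat)
    (hoff : ∀ r, 1 ≤ r → r < 8 → T.testBit (8 * k + r) = false) :
    (T >>> (8 * k)) &&& 255 = (if T.testBit (8 * k) then 1 else 0) := by
  apply Nat.eq_of_testBit_eq
  intro r
  rw [Nat.testBit_and, Nat.testBit_shiftRight,
      show (255 : Nat) = 2 ^ 8 - 1 by norm_num, Nat.testBit_two_pow_sub_one]
  rcases Nat.eq_zero_or_pos r with hr | hr
  · subst hr
    rcases Bool.eq_false_or_eq_true (T.testBit (8 * k)) with h | h <;> simp [h]
  · by_cases hr8 : r < 8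
    · rw [hoff r hr hr8]
      rcases Bool.eq_false_or_eq_true (T.testBit (8 * k)) with h | h <;>
        simp [h, pv_testBit_one] <;> omega
    · rcases Bool.eq_false_or_eq_true (T.testBit (8 * k)) with h | h <;>
        simp [h, hr8, pv_testBit_one] <;> omega

theorem pv_map_range (rl : Int) (f : Int → Int) (g : Nat → Int)
    (h : ∀ k : Nat, (k : Int) < rl → f k = g k) :
    (PySem.List.pyRange 0 rl 1).map f = (List.range (max rl 0).toNat).map g := by
  rcases le_or_gt rl 0 with hle | hpos
  · have h0 : PySem.List.pyRange 0 rl 1 = [] := by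
      rw [List.eq_nil_iff_forall_not_mem]
      intro x hx
      have := PySem.List.mem_pyRange_one.mp hx
      omega
    have h1 : (max rl 0).toNat = 0 := by omega
    rw [h0, h1]
    rfl
  · have h1 : rl = (((max rl 0).toNat : Nat) : Int) := by omega
    rw [show PySem.List.pyRange 0 rl 1 = PySem.List.pyRange 0 (((max rl 0).toNat : Nat) : Int) 1 by
          rw [← h1],
        PySem.List.pyRange_zero_natCast, List.map_map]
    apply List.map_congr_left
    intro a ha
    simp only [List.mem_range] at ha
    exact h a (by omega)

theorem pv_A_eq_B (poly sequence : List Int) :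
    apply_poly_to_sequence poly sequence = apply_poly_to_sequence_alt poly sequence := by
  unfold apply_poly_to_sequence apply_poly_to_sequence_alt
  simp only []
  rw [PySem.List.foldl_append_singleton_eq_map
    (f := fun i => PySem.Int.mod ((PySem.List.enumerate poly 0).foldl
      (fun acc jc =>
        if i + jc.1 < (sequence.length : Int) then
          PySem.Int.bxor acc (jc.2 * PySem.List.pyGetD sequence (i + jc.1) 0)
        else acc) 0) 2)]
  rw [List.nil_append]
  apply pv_map_range
  intro k hklt
  set rl : Nat := (max ((sequence.length : Int) - (poly.length : Int) + 1) 0).toNat with hrl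
  have hk : k < rl := by omega
  have hT := pv_T_testBit sequence rl poly 0 0
  have hA := pv_A_mod sequence rl poly k hk 0 0
  simp only [Nat.cast_zero, Nat.zero_testBit, Bool.false_xor] at hT hA
  rw [hA]
  set T : Nat := (PySem.List.enumerate poly (0 : Int)).foldl
    (fun T p => if PySem.Int.band p.2 1 ≠ 0 then
        T ^^^ pvFromBytes (((sequence.map (fun s => (PySem.Int.band s 1).toNat)).drop p.1.toNat).take rl)
      else T) 0 with hTdef
  have hoff : ∀ r, 1 ≤ r → r < 8 → T.testBit (8 * k + r) = false := by
    intro r h1 h8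
    rw [hT (8 * k + r), pv_G_offgrid sequence rl poly 0 (8 * k + r) (by omega)]
  rw [pv_byte_extract T k hoff, hT (8 * k)]
  have hm0 : PySem.Int.mod 0 2 = 0 := by decide
  rw [hm0]
  rcases Bool.eq_false_or_eq_true (pvG sequence rl poly 0 (8 * k)) with h | h <;>
    rw [h] <;> norm_num

-- ===== VERDICT (by name: the statement is the Claim_ definition above) =====
theorem apply_poly_to_sequence_spec : Claim_equal_apply_poly_to_sequence := by
  intro poly sequence _
  unfold Spec_apply_poly_to_sequence
  exact pv_A_eq_B poly sequence
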